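-- pv_equiv track=rewrite | github.com/hardith/Identifier-Name-TreeSitter-Linter | identifier_violation_helper.py | check_identifier_encoding
-- ===== SOURCE A (Python) =====
-- def check_identifier_encoding(identifier_name):
--     index_list = [x for x,y in enumerate(list(identifier_name)) if(y.isupper())]
--
--     if len(index_list) > 0 and index_list[0] != 0:
--         index_list = [0] + index_list
--
--     camel_=[]
--
--     for i in range(len(index_list)):
--         try:
--             camel_.append(identifier_name[:index_list[i+1]])
--         except:
--             camel_.append(identifier_name[index_list[i]:])
--
--     if len(camel_) > 0:
--         if len(camel_[0]) == 1:
--             return True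
--         else:
--             return False
--     else:
--         return False
-- ===== SOURCE B (Python) =====
-- def check_identifier_encoding(identifier_name):
--     # Closed form: the first camelCase segment has length 1 exactly when the
--     # second character is uppercase, or the name is a single uppercase char.
--     if len(identifier_name) >= 2:
--         return identifier_name[1].isupper()
--     if len(identifier_name) == 1:
--         return identifier_name[0].isupper()
--     return False
-- ===== Notes on version B (the rewrite author's own statement) =====
-- stated objective: faster
-- what changed: Replaced the enumerate/filter index list, the prepend-0 fixup and the try/except segment-building loop by a closed-form O(1) test of the second (or only) character: the first camelCase segment has length 1 iff the second character is uppercase, or the name is a single uppercase character.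
import Mathlib
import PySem

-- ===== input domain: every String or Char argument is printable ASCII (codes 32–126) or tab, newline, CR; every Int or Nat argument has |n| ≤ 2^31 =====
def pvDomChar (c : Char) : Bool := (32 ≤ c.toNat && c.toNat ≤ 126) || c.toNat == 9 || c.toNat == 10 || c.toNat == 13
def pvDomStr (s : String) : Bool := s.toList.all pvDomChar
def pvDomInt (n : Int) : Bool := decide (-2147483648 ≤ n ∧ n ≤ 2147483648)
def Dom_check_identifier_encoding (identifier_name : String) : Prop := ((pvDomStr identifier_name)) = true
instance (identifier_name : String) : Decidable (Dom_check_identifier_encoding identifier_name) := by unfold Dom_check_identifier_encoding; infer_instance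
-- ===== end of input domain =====

-- B replaces A's index-list/try-except segment construction by an O(1) closed-form
-- test of the second (or only) character; equivalence is proved on all strings.

-- ===== PORT A =====
-- index_list = [x for x,y in enumerate(list(identifier_name)) if y.isupper()]
def pvIndexList (cs : List Char) : List Int :=
  ((PySem.List.enumerate cs 0).filter (fun p => PySem.Chars.isupper p.2)).map (·.1)

def check_identifier_encoding (identifier_name : String) : Bool :=
  let cs := identifier_name.toList
  let index_list := pvIndexList cs
  -- if len(index_list) > 0 and index_list[0] != 0: index_list = [0] + index_list
  let index_list :=
    if 0 < index_list.length ∧ index_list[0]? ≠ some 0 then 0 :: index_list else index_list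
  -- for i in range(len(index_list)): try camel_.append(name[:index_list[i+1]])
  --                                  except: camel_.append(name[index_list[i]:])
  let camel_ : List (List Char) :=
    (List.range index_list.length).map (fun i =>
      match index_list[i+1]? with
      | some nxt => PySem.List.slice cs none (some nxt)
      | none =>
        match index_list[i]? with
        | some cur => PySem.List.slice cs (some cur) none
        | none => [])   -- unreachable: i < len(index_list)
  match camel_.head? with
  | some first => decide (first.length = 1)
  | none => false

-- ===== PORT B =====
def check_identifier_encoding_alt (identifier_name : String) : Bool :=
  let cs := identifier_name.toList
  if 2 ≤ cs.length then
    match PySem.List.pyGet? cs 1 with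
    | some c => PySem.Chars.isupper c
    | none => false
  else if cs.length = 1 then
    match PySem.List.pyGet? cs 0 with
    | some c => PySem.Chars.isupper c
    | none => false
  else false

-- ===== PRECONDITION & SPEC =====
def Spec_check_identifier_encoding (identifier_name : String) (out : Bool) : Prop := out = check_identifier_encoding_alt identifier_name
instance (identifier_name : String) (out : Bool) : Decidable (Spec_check_identifier_encoding identifier_name out) := by unfold Spec_check_identifier_encoding; infer_instance

-- ===== CLAIM (what is proved, stated in full; the proofs are below) =====
def Claim_equal_check_identifier_encoding : Prop := ∀ (identifier_name : String), Dom_check_identifier_encoding identifier_name → Spec_check_identifier_encoding identifier_name (check_identifier_encoding identifier_name)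

-- ===== LEMMAS AND PROOFS =====

-- generalised index list (A's comprehension with an arbitrary enumerate start)
def pvG (cs : List Char) (s : Int) : List Int :=
  ((PySem.List.enumerate cs s).filter (fun p => PySem.Chars.isupper p.2)).map (·.1)

lemma pvG_cons (c : Char) (cs : List Char) (s : Int) :
    pvG (c :: cs) s = (if PySem.Chars.isupper c then [s] else []) ++ pvG cs (s + 1) := by
  simp only [pvG, PySem.List.enumerate_cons, List.filter_cons]
  split <;> simp

lemma pvG_mem_le (cs : List Char) (s k : Int) (h : k ∈ pvG cs s) : s ≤ k := by
  simp only [pvG, List.mem_map, List.mem_filter] at h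
  obtain ⟨p, ⟨hmem, -⟩, rfl⟩ := h
  obtain ⟨j, hj, rfl⟩ := (PySem.List.mem_enumerate_iff cs s p).mp hmem
  simp

lemma pvIndexList_eq (cs : List Char) : pvIndexList cs = pvG cs 0 := rfl

lemma main_lists (s : String) :
    check_identifier_encoding s = check_identifier_encoding_alt s := by
  simp only [check_identifier_encoding, check_identifier_encoding_alt, pvIndexList_eq]
  generalize s.toList = cs
  match cs with
  | [] => simp [pvG]
  | [c] =>
    by_cases h : PySem.Chars.isupper c = true <;>
      simp [pvG, h, List.range_succ_eq_map, PySem.List.slice, PySem.List.clampIdx]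
  | c0 :: c1 :: rest =>
    have hrest : ∀ k ∈ pvG rest 2, (2 : Int) ≤ k := fun k hk => pvG_mem_le rest 2 k hk
    by_cases h1 : PySem.Chars.isupper c1 = true
    · by_cases h0 : PySem.Chars.isupper c0 = true <;>
        simp [pvG_cons, h0, h1, List.range_succ_eq_map, PySem.List.slice, PySem.List.clampIdx]
    · by_cases h0 : PySem.Chars.isupper c0 = true
      · rcases hL : pvG rest 2 with _ | ⟨k, L⟩
        · simp [pvG_cons, h0, h1, hL, List.range_succ_eq_map, PySem.List.slice, PySem.List.clampIdx]
        · have hk : (2 : Int) ≤ k := hrest k (by rw [hL]; exact List.mem_cons_self ..)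
          simp [pvG_cons, h0, h1, hL, List.range_succ_eq_map, PySem.List.slice, PySem.List.clampIdx]
          have hk0 : ¬ k < 0 := by omega
          simp only [if_neg hk0]
          omega
      · rcases hL : pvG rest 2 with _ | ⟨k, L⟩
        · simp [pvG_cons, h0, h1, hL]
        · have hk : (2 : Int) ≤ k := hrest k (by rw [hL]; exact List.mem_cons_self ..)
          simp [pvG_cons, h0, h1, hL, PySem.List.slice, PySem.List.clampIdx]
          have hk0 : ¬ k = 0 := by omega
          have hk1 : ¬ k < 0 := by omega
          simp [hk0, List.range_succ_eq_map, if_neg hk1]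
          omega

-- ===== VERDICT (by name: the statement is the Claim_ definition above) =====
theorem check_identifier_encoding_spec : Claim_equal_check_identifier_encoding := by
  intro s _
  exact main_lists s
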